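-- pv_equiv track=rewrite | github.com/sanyukta-D/Optimal_Strategies_in_RCV | Case_Studies/Portland_City_Council_Data_and_Analysis/clean_and_process_election_data.py | extract_top_choices
-- ===== SOURCE A (Python) =====
-- def extract_top_choices(row, choice_columns):
--     choices = {}
--
--     # Iterate through the columns to collect rankings and check for issues
--     for col in choice_columns:
--         if row[col] > 0:  # A valid vote
--             parts = col.split(":")
--             candidate = parts[-2]  # Extract candidate name
--             try:
--                 rank = int(parts[-4])  # Extract rank
--
--                 # Check for repeat rankings: Keep only the highest rank for a candidate
--                 if candidate in choices:
--                     if rank < choices[candidate]: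
--                         choices[candidate] = rank  # Update to the higher rank
--                 else:
--                     choices[candidate] = rank
--             except ValueError:
--                 continue
--
--     # Handle overvotes by skipping ranks with multiple candidates
--     rank_to_candidates = {}
--     for candidate, rank in choices.items():
--         if rank not in rank_to_candidates:
--             rank_to_candidates[rank] = []
--         rank_to_candidates[rank].append(candidate)
--
--     # Resolve overvotes by keeping only the first candidate in rank order and skipping others
--     resolved_choices = []
--     for rank in sorted(rank_to_candidates.keys()):
--         candidates_at_rank = rank_to_candidates[rank]
--         if len(candidates_at_rank) == 1:
--             resolved_choices.append((rank, candidates_at_rank[0]))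
--         # If there's an overvote (multiple candidates), skip this rank
--
--     # Sort choices by rank and return the top 6, padded with None if fewer than 6
--     sorted_choices = sorted(resolved_choices, key=lambda x: x[0])[:6]
--
--     return [candidate for _, candidate in sorted_choices] + [None] * (6 - len(sorted_choices))
-- ===== SOURCE B (Python) =====
-- def extract_top_choices(row, choice_columns):
--     # parse valid votes into a flat (rank, candidate) event list (no dict at all)
--     events = []
--     for col in choice_columns:
--         if row[col] > 0:
--             parts = col.split(":")
--             candidate = parts[-2]
--             try:
--                 rank = int(parts[-4])
--             except ValueError:
--                 continue
--             events.append((rank, candidate))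
--     # sort by rank; the first occurrence of a candidate then carries its best rank
--     events.sort(key=lambda e: e[0])
--     seen = set()
--     dedup = []
--     for rank, cand in events:
--         if cand not in seen:
--             seen.add(cand)
--             dedup.append((rank, cand))
--     # sweep runs of equal rank: a run of length 1 is a kept choice, longer runs are overvotes
--     out = []
--     i = 0
--     n = len(dedup)
--     while i < n:
--         r = dedup[i][0]
--         if i + 1 < n and dedup[i + 1][0] == r:
--             while i < n and dedup[i][0] == r:
--                 i += 1
--         else:
--             out.append(dedup[i][1])
--             i += 1
--     top = out[:6]
--     return top + [None] * (6 - len(top))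
-- ===== Notes on version B (the rewrite author's own statement) =====
-- stated objective: alternative
-- what changed: The candidate->min-rank dict and the rank->candidates inversion dict are gone: B collects the raw (rank, candidate) votes in a flat list, sorts it once by rank, takes each candidate's first (= best-ranked) occurrence via a seen-set, and resolves overvotes by a linear sweep over runs of equal rank, keeping only runs of length 1.
import Mathlib
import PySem

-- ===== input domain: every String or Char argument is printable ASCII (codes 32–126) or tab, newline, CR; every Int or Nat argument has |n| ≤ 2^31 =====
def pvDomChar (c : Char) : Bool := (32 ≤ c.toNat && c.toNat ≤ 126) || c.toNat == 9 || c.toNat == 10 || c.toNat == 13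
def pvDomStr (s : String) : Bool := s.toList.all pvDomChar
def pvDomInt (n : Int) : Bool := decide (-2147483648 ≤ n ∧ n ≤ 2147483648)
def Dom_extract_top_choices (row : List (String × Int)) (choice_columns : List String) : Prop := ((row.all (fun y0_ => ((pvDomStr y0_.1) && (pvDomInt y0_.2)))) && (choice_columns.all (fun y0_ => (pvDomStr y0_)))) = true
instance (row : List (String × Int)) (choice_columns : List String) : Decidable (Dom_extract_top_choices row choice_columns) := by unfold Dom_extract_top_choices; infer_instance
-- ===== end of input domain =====

-- B drops both dicts: it collects the raw (rank, candidate) votes in a flat list, sorts once by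
-- rank, keeps each candidate's first (= best-ranked) occurrence via a seen-set, and resolves
-- overvotes by sweeping runs of equal rank, keeping runs of length 1 ("alternative").

-- ===== PORT A =====
-- col.split(":"): the separator ":" is a nonempty literal, so Python's split never raises; split? is some here
def pvSplit (s : String) : List String := (PySem.Str.split? s ":").getD []
-- A's first loop: candidate -> best (lowest) rank
def pvChoicesStepA (row : List (String × Int)) (choices : PySem.Dict String Int) (col : String) : PySem.Dict String Int :=
  match (PySem.Dict.mk row).get? col with
  | none => choices  -- KeyError: excluded by Pre_
  | some v =>
    if v > 0 then
      let parts := pvSplit col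
      let candidate := PySem.List.pyGetD parts (-2) ""   -- parts[-2]; in range under Pre_
      match PySem.Int.ofStr? (PySem.List.pyGetD parts (-4) "") with  -- int(parts[-4]); index in range under Pre_
      | none => choices  -- ValueError: continue
      | some rank =>
        if choices.contains candidate then
          (if rank < choices.getD candidate 0 then choices.insert candidate rank else choices)
        else choices.insert candidate rank
    else choices

def pvRtcStep (m : PySem.Dict Int (List String)) (p : String × Int) : PySem.Dict Int (List String) :=
  let m' := if m.contains p.2 then m else m.insert p.2 ([] : List String)
  m'.modify p.2 [] (fun l => l ++ [p.1])

def extract_top_choices (row : List (String × Int)) (choice_columns : List String) : List (Option String) :=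
  let choices := choice_columns.foldl (pvChoicesStepA row) PySem.Dict.empty
  let rtc := choices.items.foldl pvRtcStep PySem.Dict.empty
  let resolved := (PySem.List.sorted rtc.keys (fun x => x) false).foldl (fun acc r =>
      let cs := rtc.getD r []
      if cs.length == 1 then acc ++ [(r, PySem.List.pyGetD cs 0 "")] else acc) []
  let sorted_choices := (PySem.List.sorted resolved (fun x => x.1) false).take 6
  sorted_choices.map (fun p => some p.2) ++ List.replicate (6 - sorted_choices.length) none

-- ===== PORT B =====
-- Source B's first loop: flat list of (rank, candidate) events, same parsing as A
def pvEventsStep (row : List (String × Int)) (acc : List (Int × String)) (col : String) : List (Int × String) :=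
  match (PySem.Dict.mk row).get? col with
  | none => acc  -- KeyError: excluded by Pre_
  | some v =>
    if v > 0 then
      let parts := pvSplit col
      let candidate := PySem.List.pyGetD parts (-2) ""
      match PySem.Int.ofStr? (PySem.List.pyGetD parts (-4) "") with
      | none => acc  -- ValueError: continue
      | some rank => acc ++ [(rank, candidate)]
    else acc

-- Source B's seen-set loop state: (seen, dedup)
def pvDedupStep (st : PySem.Set String × List (Int × String)) (e : Int × String) : PySem.Set String × List (Int × String) :=
  if PySem.Set.contains st.1 e.2 then st else (PySem.Set.add st.1 e.2, st.2 ++ [e])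

-- Source B's index sweep over the sorted dedup list, as recursion on the remaining suffix:
-- a run of equal rank of length ≥ 2 is dropped whole, a singleton run emits its candidate
def pvSweep : List (Int × String) → List String
  | [] => []
  | [e] => [e.2]
  | e1 :: e2 :: t =>
    if e1.1 == e2.1 then pvSweep ((e2 :: t).dropWhile (fun e => e.1 == e1.1))
    else e1.2 :: pvSweep (e2 :: t)
termination_by l => l.length
decreasing_by
  · have h := List.length_dropWhile_le (fun e => e.1 == e1.1) (e2 :: t)
    simp only [List.length_cons] at *; omega
  · simp only [List.length_cons]; omega

def extract_top_choices_alt (row : List (String × Int)) (choice_columns : List String) : List (Option String) :=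
  let events := choice_columns.foldl (pvEventsStep row) []
  let sortedE := PySem.List.sorted events (fun e => e.1) false
  let dedup := (sortedE.foldl pvDedupStep (PySem.Set.empty, [])).2
  let top := (pvSweep dedup).take 6
  top.map (fun c => some c) ++ List.replicate (6 - top.length) none

-- ===== PRECONDITION & SPEC =====
-- Pre_ = exactly the inputs where Python A returns: every column is a key of row (else KeyError),
-- and every column with a positive vote splits on ":" into at least 4 parts (else IndexError on parts[-2]/parts[-4]).
def Pre_extract_top_choices (row : List (String × Int)) (choice_columns : List String) : Prop :=
  ∀ col ∈ choice_columns, (PySem.Dict.mk row).contains col = true ∧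
    ((PySem.Dict.mk row).getD col 0 > 0 → 4 ≤ (pvSplit col).length)
instance (row : List (String × Int)) (choice_columns : List String) : Decidable (Pre_extract_top_choices row choice_columns) := by unfold Pre_extract_top_choices; infer_instance

def pvWitness_extract_top_choices : (List (String × Int)) × List String :=
  ([("1:a:Alice:x", 1), ("2:a:Bob:x", 1)], ["1:a:Alice:x", "2:a:Bob:x"])

def Spec_extract_top_choices (row : List (String × Int)) (choice_columns : List String) (out : List (Option String)) : Prop := out = extract_top_choices_alt row choice_columns
instance (row : List (String × Int)) (choice_columns : List String) (out : List (Option String)) : Decidable (Spec_extract_top_choices row choice_columns out) := by unfold Spec_extract_top_choices; infer_instance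

-- ===== CLAIM (what is proved, stated in full; the proofs are below) =====
def Claim_equal_extract_top_choices : Prop := ∀ (row : List (String × Int)) (choice_columns : List String), Dom_extract_top_choices row choice_columns → Pre_extract_top_choices row choice_columns → Spec_extract_top_choices row choice_columns (extract_top_choices row choice_columns)

-- ===== LEMMAS AND PROOFS =====

-- the shared skip/parse step of both first loops
def pvParse (row : List (String × Int)) (col : String) : Option (Int × String) :=
  match (PySem.Dict.mk row).get? col with
  | none => none
  | some v =>
    if v > 0 then
      match PySem.Int.ofStr? (PySem.List.pyGetD (pvSplit col) (-4) "") with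
      | none => none
      | some rank => some (rank, PySem.List.pyGetD (pvSplit col) (-2) "")
    else none

-- A's dict update, per parsed event
def pvMinUpd (d : PySem.Dict String Int) (e : Int × String) : PySem.Dict String Int :=
  if d.contains e.2 then (if e.1 < d.getD e.2 0 then d.insert e.2 e.1 else d)
  else d.insert e.2 e.1

-- ranks of candidate c in an event list
def pvRanks (c : String) (E : List (Int × String)) : List Int :=
  (E.filter (fun e => e.2 == c)).map (fun e => e.1)

-- "r is the best (minimal) rank of candidate c among the events E"
def pvIsMin (c : String) (r : Int) (E : List (Int × String)) : Prop :=
  r ∈ pvRanks c E ∧ ∀ x ∈ pvRanks c E, r ≤ x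

-- running-min merge of A's dict fold, per candidate
def pvMergeMin (o : Option Int) (r : Int) : Option Int :=
  some (match o with | none => r | some m => min m r)

-- the keep-first-occurrence recursion underlying Source B's seen-set loop
def pvKF (seen : PySem.Set String) : List (Int × String) → List (Int × String)
  | [] => []
  | e :: t => if PySem.Set.contains seen e.2 then pvKF seen t else e :: pvKF (PySem.Set.add seen e.2) t

-- the candidates recorded at rank r, in dict order
def pvCands (items : List (String × Int)) (r : Int) : List String :=
  (items.filter (fun p => p.2 == r)).map (fun p => p.1)

-- the common canonical value: uniquely-ranked (rank, candidate) pairs in increasing rank order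
def pvC (items : List (String × Int)) : List (Int × String) :=
  ((PySem.List.sorted (PySem.Set.ofList (items.map (fun p => p.2))) (fun x => x) false).filter
      (fun r => (pvCands items r).length == 1)).map
    (fun r => (r, PySem.List.pyGetD (pvCands items r) 0 ""))

def pvTail6 (l : List (Int × String)) : List (Option String) :=
  ((PySem.List.sorted l (fun x => x.1) false).take 6).map (fun p => some p.2)
    ++ List.replicate (6 - ((PySem.List.sorted l (fun x => x.1) false).take 6).length) none

-- ---- step/fold reshaping ----
theorem pv_stepA_eq (row : List (String × Int)) (d : PySem.Dict String Int) (col : String) :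
    pvChoicesStepA row d col = match pvParse row col with | none => d | some e => pvMinUpd d e := by
  
  simp only [pvChoicesStepA, pvParse, pvMinUpd]
  cases (PySem.Dict.mk row).get? col with
  | none => rfl
  | some v =>
    by_cases hv : v > 0
    · simp only [if_pos hv]
      cases PySem.Int.ofStr? (PySem.List.pyGetD (pvSplit col) (-4) "") with
      | none => rfl
      | some rank => rfl
    · simp only [if_neg hv]

theorem pv_stepE_eq (row : List (String × Int)) (acc : List (Int × String)) (col : String) :
    pvEventsStep row acc col = acc ++ (pvParse row col).toList := by
  
  simp only [pvEventsStep, pvParse]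
  cases (PySem.Dict.mk row).get? col with
  | none => simp
  | some v =>
    by_cases hv : v > 0
    · simp only [if_pos hv]
      cases PySem.Int.ofStr? (PySem.List.pyGetD (pvSplit col) (-4) "") with
      | none => simp
      | some rank => simp
    · simp [if_neg hv]

theorem pv_foldA (row : List (String × Int)) (cc : List String) (d : PySem.Dict String Int) :
    cc.foldl (pvChoicesStepA row) d = (cc.filterMap (pvParse row)).foldl pvMinUpd d := by
  
  induction cc generalizing d with
  | nil => rfl
  | cons col cc ih =>
    simp only [List.foldl_cons, List.filterMap_cons, pv_stepA_eq]
    cases pvParse row col with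
    | none => exact ih d
    | some e => simp only [List.foldl_cons]; exact ih (pvMinUpd d e)

theorem pv_foldE (row : List (String × Int)) (cc : List String) (acc : List (Int × String)) :
    cc.foldl (pvEventsStep row) acc = acc ++ cc.filterMap (pvParse row) := by
  
  induction cc generalizing acc with
  | nil => simp
  | cons col cc ih =>
    simp only [List.foldl_cons, List.filterMap_cons, pv_stepE_eq]
    cases pvParse row col with
    | none => simpa using ih acc
    | some e => rw [ih]; simp

theorem pv_foldDedup (l : List (Int × String)) (seen : PySem.Set String) (acc : List (Int × String)) :
    (l.foldl pvDedupStep (seen, acc)).2 = acc ++ pvKF seen l := by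
  
  induction l generalizing seen acc with
  | nil => simp [pvKF]
  | cons e t ih =>
    simp only [List.foldl_cons, pvDedupStep, pvKF]
    by_cases hc : PySem.Set.contains seen e.2 = true
    · simp only [if_pos hc]; exact ih seen acc
    · simp only [if_neg hc]; rw [ih]; simp

-- ---- A's dict characterised: get? c is the running min of c's ranks ----
theorem pv_minUpd_get (E : List (Int × String)) (d : PySem.Dict String Int) (c : String) :
    (E.foldl pvMinUpd d).get? c = (pvRanks c E).foldl pvMergeMin (d.get? c) := by
  
  induction E generalizing d with
  | nil => rfl
  | cons e t ih =>
    simp only [List.foldl_cons]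
    rw [ih]
    by_cases hc : e.2 = c
    · have hranks : pvRanks c (e :: t) = e.1 :: pvRanks c t := by
        simp [pvRanks, hc]
      rw [hranks]
      simp only [List.foldl_cons]
      congr 1
      -- (pvMinUpd d e).get? c = pvMergeMin (d.get? c) e.1
      subst hc
      simp only [pvMinUpd, pvMergeMin]
      by_cases hcon : d.contains e.2 = true
      · obtain ⟨m, hm⟩ : ∃ m, d.get? e.2 = some m := by
          have := PySem.Dict.contains_eq_isSome_get? d e.2
          rw [hcon] at this
          exact Option.isSome_iff_exists.mp this.symm
        have hgd : d.getD e.2 0 = m := by rw [PySem.Dict.getD_eq_get?_getD, hm]; rfl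
        by_cases hlt : e.1 < d.getD e.2 0
        · simp only [if_pos hcon, if_pos hlt, PySem.Dict.get?_insert_self, hm]
          rw [hgd] at hlt
          simp [min_eq_right (le_of_lt hlt)]
        · simp only [if_pos hcon, if_neg hlt, hm]
          rw [hgd] at hlt
          simp [min_eq_left (le_of_not_gt hlt)]
      · have hnone : d.get? e.2 = none := by
          have := PySem.Dict.contains_eq_isSome_get? d e.2
          rw [Bool.not_eq_true] at hcon
          rw [hcon] at this
          simpa using this.symm
        simp [if_neg hcon, hnone, PySem.Dict.get?_insert_self]
    · have hranks : pvRanks c (e :: t) = pvRanks c t := by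
        simp [pvRanks, hc]
      rw [hranks]
      congr 1
      simp only [pvMinUpd]
      by_cases hcon : d.contains e.2 = true
      · by_cases hlt : e.1 < d.getD e.2 0 <;>
          simp [hcon, hlt, PySem.Dict.get?_insert_of_ne _ _ (fun h => hc h.symm)]
      · simp [hcon, PySem.Dict.get?_insert_of_ne _ _ (fun h => hc h.symm)]

theorem pv_minUpd_nodup (E : List (Int × String)) (d : PySem.Dict String Int) (h : d.keys.Nodup) :
    (E.foldl pvMinUpd d).keys.Nodup := by
  
  induction E generalizing d with
  | nil => exact h
  | cons e t ih =>
    apply ih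
    simp only [pvMinUpd]
    by_cases hcon : d.contains e.2 = true
    · by_cases hlt : e.1 < d.getD e.2 0
      · simp only [if_pos hcon, if_pos hlt]; exact PySem.Dict.nodup_keys_insert _ _ _ h
      · simp only [if_pos hcon, if_neg hlt]; exact h
    · simp only [if_neg hcon]; exact PySem.Dict.nodup_keys_insert _ _ _ h

theorem pv_mergeMin_spec (l : List Int) (m : Int) :
    l.foldl pvMergeMin none = some m ↔ (m ∈ l ∧ ∀ x ∈ l, m ≤ x) := by
  
  have key : ∀ (t : List Int) (a : Int), ∃ m', t.foldl pvMergeMin (some a) = some m' ∧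
      (m' = a ∨ m' ∈ t) ∧ m' ≤ a ∧ ∀ x ∈ t, m' ≤ x := by
    intro t
    induction t with
    | nil => intro a; exact ⟨a, rfl, Or.inl rfl, le_refl a, by simp⟩
    | cons b t ih =>
      intro a
      obtain ⟨m', h1, h2, h3, h4⟩ := ih (min a b)
      refine ⟨m', ?_, ?_, le_trans h3 (min_le_left a b), ?_⟩
      · simpa [pvMergeMin] using h1
      · rcases h2 with h2 | h2
        · rcases le_total a b with hab | hab
          · exact Or.inl (by rw [h2, min_eq_left hab])
          · exact Or.inr (by simp [h2, min_eq_right hab])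
        · exact Or.inr (List.mem_cons_of_mem _ h2)
      · intro x hx
        rcases List.mem_cons.mp hx with rfl | hx
        · exact le_trans h3 (min_le_right a x)
        · exact h4 x hx
  constructor
  · intro h
    cases l with
    | nil => simp at h
    | cons a t =>
      obtain ⟨m', h1, h2, h3, h4⟩ := key t a
      have : m' = m := by
        have := h1
        simp only [List.foldl_cons, pvMergeMin] at h
        rw [this] at h
        exact Option.some.inj h
      subst this
      constructor
      · rcases h2 with rfl | h2
        · exact List.mem_cons_self
        · exact List.mem_cons_of_mem _ h2
      · intro x hx
        rcases List.mem_cons.mp hx with rfl | hx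
        · exact h3
        · exact h4 x hx
  · rintro ⟨hm, hlb⟩
    cases l with
    | nil => simp at hm
    | cons a t =>
      obtain ⟨m', h1, h2, h3, h4⟩ := key t a
      have hle : m' ≤ m := by
        rcases List.mem_cons.mp hm with rfl | hm'
        · exact h3
        · exact h4 m hm'
      have hge : m ≤ m' := by
        rcases h2 with rfl | h2
        · exact hlb m' List.mem_cons_self
        · exact hlb m' (List.mem_cons_of_mem _ h2)
      have : m' = m := le_antisymm hle hge
      simp only [List.foldl_cons, pvMergeMin]
      rw [h1, this]

theorem pv_dict_char (E : List (Int × String)) (c : String) (r : Int) :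
    (E.foldl pvMinUpd PySem.Dict.empty).get? c = some r ↔ pvIsMin c r E := by
  
  rw [pv_minUpd_get, PySem.Dict.get?_empty]
  exact pv_mergeMin_spec (pvRanks c E) r

-- ---- the keep-first recursion characterised ----
theorem pv_kf_sublist (seen : PySem.Set String) (l : List (Int × String)) :
    (pvKF seen l).Sublist l := by
  
  induction l generalizing seen with
  | nil => simp [pvKF]
  | cons e t ih =>
    simp only [pvKF]
    by_cases hc : PySem.Set.contains seen e.2 = true
    · simp only [if_pos hc]; exact (ih seen).cons e
    · simp only [if_neg hc]; exact (ih (PySem.Set.add seen e.2)).cons₂ e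

theorem pv_kf_mem (seen : PySem.Set String) (l : List (Int × String))
    (hp : l.Pairwise (fun a b => a.1 ≤ b.1)) :
    ∀ e ∈ pvKF seen l, e.2 ∉ seen ∧ e ∈ l ∧ ∀ e' ∈ l, e'.2 = e.2 → e.1 ≤ e'.1 := by
  
  induction l generalizing seen with
  | nil => simp [pvKF]
  | cons a t ih =>
    have ha : ∀ b ∈ t, a.1 ≤ b.1 := fun b hb => (List.pairwise_cons.mp hp).1 b hb
    have hpt : t.Pairwise (fun x y => x.1 ≤ y.1) := (List.pairwise_cons.mp hp).2
    intro e he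
    simp only [pvKF] at he
    by_cases hc : PySem.Set.contains seen a.2 = true
    · rw [if_pos hc] at he
      obtain ⟨h1, h2, h3⟩ := ih seen hpt e he
      refine ⟨h1, List.mem_cons_of_mem _ h2, ?_⟩
      intro e' he' heq
      rcases List.mem_cons.mp he' with rfl | he'
      · exact absurd (heq ▸ (PySem.Set.contains_iff seen e'.2).mp hc) h1
      · exact h3 e' he' heq
    · rw [if_neg hc] at he
      rcases List.mem_cons.mp he with rfl | he
      · refine ⟨fun h => hc ((PySem.Set.contains_iff seen e.2).mpr h), List.mem_cons_self, ?_⟩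
        intro e' he' _
        rcases List.mem_cons.mp he' with rfl | he'
        · exact le_refl _
        · exact ha e' he'
      · obtain ⟨h1, h2, h3⟩ := ih (PySem.Set.add seen a.2) hpt e he
        have h1' : e.2 ∉ seen ∧ e.2 ≠ a.2 := by
          constructor
          · exact fun h => h1 ((PySem.Set.mem_add _ _ _).mpr (Or.inl h))
          · exact fun h => h1 ((PySem.Set.mem_add _ _ _).mpr (Or.inr h))
        refine ⟨h1'.1, List.mem_cons_of_mem _ h2, ?_⟩
        intro e' he' heq
        rcases List.mem_cons.mp he' with rfl | he'
        · exact absurd heq.symm h1'.2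
        · exact h3 e' he' heq

theorem pv_kf_exists (seen : PySem.Set String) (l : List (Int × String)) (c : String)
    (hc : c ∉ seen) (hmem : c ∈ l.map (fun e => e.2)) :
    ∃ r, (r, c) ∈ pvKF seen l := by
  
  induction l generalizing seen with
  | nil => simp at hmem
  | cons a t ih =>
    simp only [pvKF]
    by_cases hac : a.2 = c
    · have hnc : PySem.Set.contains seen a.2 = false := by
        rw [hac]
        by_contra h
        exact hc ((PySem.Set.contains_iff seen c).mp (by simpa using h))
      rw [hnc]
      simp only [Bool.false_eq_true, if_false]
      exact ⟨a.1, by rw [← hac]; exact List.mem_cons_self⟩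
    · have hmem' : c ∈ t.map (fun e => e.2) := by
        rcases List.mem_map.mp hmem with ⟨e, he, heq⟩
        rcases List.mem_cons.mp he with rfl | he
        · exact absurd heq hac
        · exact List.mem_map.mpr ⟨e, he, heq⟩
      by_cases hsc : PySem.Set.contains seen a.2 = true
      · rw [if_pos hsc]; exact ih seen hc hmem'
      · rw [if_neg hsc]
        have hc' : c ∉ PySem.Set.add seen a.2 := by
          intro h
          rcases (PySem.Set.mem_add _ _ _).mp h with h | h
          · exact hc h
          · exact hac h.symm
        obtain ⟨r, hr⟩ := ih (PySem.Set.add seen a.2) hc' hmem'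
        exact ⟨r, List.mem_cons_of_mem _ hr⟩

theorem pv_kf_notin (seen : PySem.Set String) (l : List (Int × String)) :
    ∀ e ∈ pvKF seen l, e.2 ∉ seen := by
  induction l generalizing seen with
  | nil => simp [pvKF]
  | cons a t ih =>
    intro e he
    simp only [pvKF] at he
    by_cases hc : PySem.Set.contains seen a.2 = true
    · rw [if_pos hc] at he; exact ih seen e he
    · rw [if_neg hc] at he
      rcases List.mem_cons.mp he with rfl | he
      · exact fun h => hc ((PySem.Set.contains_iff seen e.2).mpr h)
      · exact fun h => ih (PySem.Set.add seen a.2) e he ((PySem.Set.mem_add _ _ _).mpr (Or.inl h))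

theorem pv_kf_nodup_snd (seen : PySem.Set String) (l : List (Int × String)) :
    ((pvKF seen l).map (fun e => e.2)).Nodup := by
  induction l generalizing seen with
  | nil => simp [pvKF]
  | cons a t ih =>
    simp only [pvKF]
    by_cases hc : PySem.Set.contains seen a.2 = true
    · rw [if_pos hc]; exact ih seen
    · rw [if_neg hc]
      simp only [List.map_cons, List.nodup_cons]
      refine ⟨?_, ih (PySem.Set.add seen a.2)⟩
      intro h
      rcases List.mem_map.mp h with ⟨e, he, heq⟩
      exact pv_kf_notin (PySem.Set.add seen a.2) t e he
        ((PySem.Set.mem_add _ _ _).mpr (Or.inr heq))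

theorem pv_sweep_char (l : List (Int × String)) (hp : l.Pairwise (fun a b => a.1 ≤ b.1)) :
    pvSweep l = ((l.filter (fun e => (l.map (fun x => x.1)).count e.1 == 1)).map (fun e => e.2)) := by
  induction l using pvSweep.induct with
  | case1 => simp [pvSweep]
  | case2 e => simp [pvSweep]
  | case3 e1 e2 t heq ih =>
    have hb : e1.1 = e2.1 := by simpa using heq
    have hp1 : ∀ b ∈ e2 :: t, e1.1 ≤ b.1 := (List.pairwise_cons.mp hp).1
    have hp2 : (e2 :: t).Pairwise (fun a b => a.1 ≤ b.1) := (List.pairwise_cons.mp hp).2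
    set p : Int × String → Bool := fun e => e.1 == e1.1 with hpdef
    set W := (e2 :: t).takeWhile p with hWdef
    set D := (e2 :: t).dropWhile p with hDdef
    have hWD : W ++ D = e2 :: t := List.takeWhile_append_dropWhile
    have hsubD : D.Sublist (e2 :: t) := List.dropWhile_sublist _
    have hpD : D.Pairwise (fun a b => a.1 ≤ b.1) := hp2.sublist hsubD
    have hW : ∀ w ∈ W, w.1 = e1.1 := by
      intro w hw
      have := List.all_takeWhile (p := p) (l := e2 :: t)
      rw [List.all_eq_true] at this
      simpa [hpdef] using this w hw
    have hD : ∀ d ∈ D, e1.1 < d.1 := by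
      intro d hd
      cases hDe : D with
      | nil => rw [hDe] at hd; simp at hd
      | cons d0 D' =>
        have hd0p : p d0 = false := by
          have h := List.head?_dropWhile_not p (e2 :: t)
          rw [show List.dropWhile p (e2 :: t) = d0 :: D' from hDe] at h
          simpa using h
        have hd0ne : d0.1 ≠ e1.1 := by simpa [hpdef] using hd0p
        have hd0mem : d0 ∈ e2 :: t := hsubD.mem (by rw [hDe]; exact List.mem_cons_self)
        have hd0lt : e1.1 < d0.1 := lt_of_le_of_ne (hp1 d0 hd0mem) (Ne.symm hd0ne)
        rw [hDe] at hd
        rcases List.mem_cons.mp hd with rfl | hd'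
        · exact hd0lt
        · have : d0.1 ≤ d.1 := by
            have := hpD; rw [hDe] at this
            exact (List.pairwise_cons.mp this).1 d hd'
          exact lt_of_lt_of_le hd0lt this
    have hcnt1 : ((e1 :: e2 :: t).map (fun x => x.1)).count e1.1
        = 2 + ((t.map (fun x => x.1)).count e1.1) := by
      simp [hb]
      omega
    -- the filtered list: e1 and every element of W are dropped, D's elements keep their D-local count
    have hfe1 : (((e1 :: e2 :: t).map (fun x => x.1)).count e1.1 == 1) = false := by
      rw [hcnt1]; simp; omega
    have hWcnt : ∀ d ∈ D, (W.map (fun x => x.1)).count d.1 = 0 := by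
      intro d hd
      rw [List.count_eq_zero]
      intro hmem
      rcases List.mem_map.mp hmem with ⟨w, hw, hweq⟩
      exact absurd (hweq ▸ (hW w hw)) (ne_of_gt (hD d hd))
    have hDcnt : ∀ d ∈ D, ((e1 :: e2 :: t).map (fun x => x.1)).count d.1
        = (D.map (fun x => x.1)).count d.1 := by
      intro d hd
      have h1 : (e2 :: t).map (fun x => x.1) = W.map (fun x => x.1) ++ D.map (fun x => x.1) := by
        rw [← List.map_append, hWD]
      rw [List.map_cons, List.count_cons, h1, List.count_append, hWcnt d hd]
      have : (e1.1 == d.1) = false := by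
        simp [ne_of_lt (hD d hd)]
      rw [this]
      simp
    have hWfilter : W.filter (fun e => (((e1 :: e2 :: t).map (fun x => x.1)).count e.1 == 1)) = [] := by
      rw [List.filter_eq_nil_iff]
      intro w hw
      rw [hW w hw, hfe1]
      simp
    have hDfilter : D.filter (fun e => (((e1 :: e2 :: t).map (fun x => x.1)).count e.1 == 1))
        = D.filter (fun e => ((D.map (fun x => x.1)).count e.1 == 1)) := by
      apply List.filter_congr
      intro d hd
      rw [hDcnt d hd]
    have hsweep : pvSweep (e1 :: e2 :: t) = pvSweep D := by
      rw [pvSweep]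
      simp only [heq, if_pos]
      rfl
    rw [hsweep, ih hpD]
    have hsplit : (e1 :: e2 :: t).filter (fun e => (((e1 :: e2 :: t).map (fun x => x.1)).count e.1 == 1))
        = D.filter (fun e => ((D.map (fun x => x.1)).count e.1 == 1)) := by
      conv_lhs => rw [show (e1 :: e2 :: t) = e1 :: (W ++ D) by rw [hWD]]
      rw [List.filter_cons]
      rw [show (e1 :: e2 :: t : List (Int × String)) = e1 :: (W ++ D) by rw [hWD]] at hfe1 hWfilter hDfilter
      rw [hfe1]
      simp only [Bool.false_eq_true, if_false]
      rw [List.filter_append, hWfilter, hDfilter]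
      simp
    rw [← hsplit]
  | case4 e1 e2 t hne ih =>
    have hb : e1.1 ≠ e2.1 := by simpa using hne
    have hp1 : ∀ b ∈ e2 :: t, e1.1 ≤ b.1 := (List.pairwise_cons.mp hp).1
    have hp2 : (e2 :: t).Pairwise (fun a b => a.1 ≤ b.1) := (List.pairwise_cons.mp hp).2
    have hlt : ∀ b ∈ e2 :: t, e1.1 < b.1 := by
      intro b hbm
      rcases List.mem_cons.mp hbm with rfl | hbm'
      · exact lt_of_le_of_ne (hp1 b hbm) hb
      · have h2b : e2.1 ≤ b.1 := (List.pairwise_cons.mp hp2).1 b hbm'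
        exact lt_of_lt_of_le (lt_of_le_of_ne (hp1 e2 List.mem_cons_self) hb) h2b
    have hcnt1 : ((e1 :: e2 :: t).map (fun x => x.1)).count e1.1 = 1 := by
      rw [List.map_cons, List.count_cons_self]
      have : ((e2 :: t).map (fun x => x.1)).count e1.1 = 0 := by
        rw [List.count_eq_zero]
        intro hmem
        rcases List.mem_map.mp hmem with ⟨b, hbm, hbeq⟩
        exact absurd (hbeq ▸ (hlt b hbm)) (lt_irrefl _)
      omega
    have hcnts : ∀ b ∈ e2 :: t, ((e1 :: e2 :: t).map (fun x => x.1)).count b.1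
        = (((e2 :: t)).map (fun x => x.1)).count b.1 := by
      intro b hbm
      rw [List.map_cons, List.count_cons]
      have : (e1.1 == b.1) = false := by simp [ne_of_lt (hlt b hbm)]
      rw [this]
      simp
    have hsweep : pvSweep (e1 :: e2 :: t) = e1.2 :: pvSweep (e2 :: t) := by
      rw [pvSweep]
      simp only [hne, Bool.false_eq_true, if_false]
    rw [hsweep, ih hp2]
    conv_rhs => rw [List.filter_cons]
    rw [hcnt1]
    simp only [BEq.rfl, if_pos, List.map_cons]
    congr 1
    apply congrArg
    apply List.filter_congr
    intro b hbm
    have h1 : b.1 ≠ e1.1 := ne_of_gt (hlt b hbm)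
    simp [List.count_cons, Ne.symm h1]

-- ---- canonical-form lemmas (A side, as before) ----
theorem pv_rtcStep_eq (m : PySem.Dict Int (List String)) (p : String × Int) :
    pvRtcStep m p = m.modify p.2 [] (fun l => l ++ [p.1]) := by
  by_cases hc : m.contains p.2 = true
  · simp [pvRtcStep, hc]
  · have hcf : m.contains p.2 = false := by simpa using hc
    simp [pvRtcStep, hcf, PySem.Dict.modify, PySem.Dict.getD_insert_self,
      PySem.Dict.getD_of_not_contains _ _ hcf, PySem.Dict.insert_insert_self]

theorem pv_rtc_getD (items : List (String × Int)) (r : Int) :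
    (items.foldl pvRtcStep PySem.Dict.empty).getD r [] = pvCands items r := by
  have hfold : items.foldl pvRtcStep PySem.Dict.empty
      = (items.map (fun p => (p.2, p.1))).foldl
          (fun m q => m.modify q.1 [] (fun l => l ++ [q.2])) PySem.Dict.empty := by
    rw [List.foldl_map]
    have hf : pvRtcStep = fun (m : PySem.Dict Int (List String)) (p : String × Int) =>
        m.modify p.2 [] (fun l => l ++ [p.1]) :=
      funext fun m => funext fun p => pv_rtcStep_eq m p
    rw [hf]
  rw [hfold, PySem.Dict.getD_foldl_modify_append]
  simp [pvCands, List.filter_map, List.map_map, Function.comp_def]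

theorem pv_rtc_keys (items : List (String × Int)) :
    (items.foldl pvRtcStep PySem.Dict.empty).keys = PySem.Set.ofList (items.map (fun p => p.2)) := by
  have hfold : items.foldl pvRtcStep PySem.Dict.empty
      = (items.map (fun p => (p.2, p.1))).foldl
          (fun m q => m.modify q.1 [] (fun l => l ++ [q.2])) PySem.Dict.empty := by
    rw [List.foldl_map]
    have hf : pvRtcStep = fun (m : PySem.Dict Int (List String)) (p : String × Int) =>
        m.modify p.2 [] (fun l => l ++ [p.1]) :=
      funext fun m => funext fun p => pv_rtcStep_eq m p
    rw [hf]
  rw [hfold]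
  have h := PySem.Dict.keys_foldl_modify_key (items.map (fun p => (p.2, p.1)))
    (fun q : Int × String => q.1) ([] : List String)
    (fun _ q => fun l => l ++ [q.2]) PySem.Dict.empty
  refine h.trans ?_
  simp only [List.map_map, Function.comp_def, PySem.Set.update, PySem.Set.ofList]
  rfl

theorem pv_pred_eq (items : List (String × Int)) (r : Int) :
    ((pvCands items r).length == 1) = ((items.map (fun p => p.2)).count r == 1) := by
  have hcnt : (items.map (fun p => p.2)).count r = List.countP (fun p : String × Int => p.2 == r) items := by
    simp [List.count, List.countP_map, Function.comp_def]
  have hlen : (pvCands items r).length = List.countP (fun p : String × Int => p.2 == r) items := by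
    simp only [pvCands, List.length_map]
    exact List.countP_eq_length_filter.symm
  rw [hcnt, hlen]

theorem pv_uniq (items : List (String × Int)) (r : Int) (h : (pvCands items r).length = 1) :
    ∃ q : String × Int, q ∈ items ∧ q.2 = r ∧ pvCands items r = [q.1]
      ∧ (∀ p ∈ items, p.2 = r → p = q) := by
  have hflen : (items.filter (fun p => p.2 == r)).length = 1 := by
    simpa [pvCands] using h
  obtain ⟨q, hq⟩ := List.length_eq_one_iff.mp hflen
  have hqmem : q ∈ items.filter (fun p => p.2 == r) := by rw [hq]; exact List.mem_singleton.mpr rfl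
  have hq2 : q.2 = r := by simpa using (List.mem_filter.mp hqmem).2
  refine ⟨q, (List.mem_filter.mp hqmem).1, hq2, by simp [pvCands, hq], ?_⟩
  intro p hp hpr
  have : p ∈ items.filter (fun p => p.2 == r) := List.mem_filter.mpr ⟨hp, by simp [hpr]⟩
  rw [hq] at this
  exact List.mem_singleton.mp this

theorem pv_C_pairwise (items : List (String × Int)) :
    (pvC items).Pairwise (fun a b => a.1 < b.1) := by
  unfold pvC
  refine List.Pairwise.map _ (fun a b h => h) ?_
  exact (PySem.List.sorted_ofList_pairwise_lt (items.map (fun p => p.2))).filter _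

theorem pv_perm (items : List (String × Int)) (hnd : (items.map (fun p => p.1)).Nodup) :
    (pvC items).Perm
      ((items.filter (fun p => ((items.map (fun q => q.2)).count p.2 == 1))).map
        (fun p => (p.2, p.1))) := by
  have hnditems : items.Nodup := hnd.of_map
  have hS : (PySem.List.sorted (PySem.Set.ofList (items.map (fun p => p.2))) (fun x => x) false).Nodup :=
    ((PySem.List.sorted_perm _ _ _).nodup_iff).mpr (PySem.Set.nodup_ofList _)
  have hC : (pvC items).Nodup := by
    unfold pvC
    exact (hS.filter _).map (fun a b hab => congrArg Prod.fst hab)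
  have hF : ((items.filter (fun p => ((items.map (fun q => q.2)).count p.2 == 1))).map
      (fun p : String × Int => (p.2, p.1))).Nodup := by
    refine (hnditems.filter _).map ?_
    intro a b hab
    exact Prod.ext (congrArg Prod.snd hab) (congrArg Prod.fst hab)
  refine (List.perm_ext_iff_of_nodup hC hF).mpr ?_
  rintro ⟨r, c⟩
  simp only [pvC, List.mem_map, List.mem_filter, PySem.List.mem_sorted, PySem.Set.mem_ofList,
    Prod.mk.injEq]
  constructor
  · rintro ⟨a, ⟨-, halen⟩, har, hac⟩
    rw [har] at halen hac
    have hlen : (pvCands items r).length = 1 := by simpa using halen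
    obtain ⟨q, hqmem, hq2, hqc, -⟩ := pv_uniq items r hlen
    have hc : q.1 = c := by
      rw [hqc] at hac
      simpa [PySem.List.pyGetD_zero_cons] using hac
    refine ⟨q, ⟨hqmem, ?_⟩, hq2, hc⟩
    rw [← pv_pred_eq, hq2]
    exact halen
  · rintro ⟨p, ⟨hpmem, hpcnt⟩, hp2, hp1⟩
    have halen : ((pvCands items p.2).length == 1) = true := by
      rw [pv_pred_eq]; exact hpcnt
    have hlen : (pvCands items p.2).length = 1 := by simpa using halen
    obtain ⟨q, hqmem, hq2, hqc, huniq⟩ := pv_uniq items p.2 hlen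
    have hpq : p = q := huniq p hpmem rfl
    refine ⟨p.2, ⟨⟨p, hpmem, rfl⟩, halen⟩, hp2, ?_⟩
    rw [hqc, ← hpq]
    simpa [PySem.List.pyGetD_zero_cons] using hp1

theorem pv_A_main (row : List (String × Int)) (cc : List String) :
    extract_top_choices row cc
      = pvTail6 (pvC ((cc.filterMap (pvParse row)).foldl pvMinUpd PySem.Dict.empty).items) := by
  unfold extract_top_choices
  simp only [pv_foldA]
  set d := (cc.filterMap (pvParse row)).foldl pvMinUpd PySem.Dict.empty with hd
  have hres : (PySem.List.sorted (d.items.foldl pvRtcStep PySem.Dict.empty).keys (fun x => x) false).foldl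
      (fun acc r =>
        if ((d.items.foldl pvRtcStep PySem.Dict.empty).getD r []).length == 1
        then acc ++ [(r, PySem.List.pyGetD ((d.items.foldl pvRtcStep PySem.Dict.empty).getD r []) 0 "")]
        else acc) []
      = pvC d.items := by
    rw [pv_rtc_keys]
    rw [PySem.List.foldl_append_if
      (fun r => ((d.items.foldl pvRtcStep PySem.Dict.empty).getD r []).length == 1)
      (fun r => (r, PySem.List.pyGetD ((d.items.foldl pvRtcStep PySem.Dict.empty).getD r []) 0 ""))]
    simp only [pv_rtc_getD, List.nil_append, pvC]
  rw [hres]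
  rfl

theorem pv_ranks_perm (E : List (Int × String)) (c : String) :
    (pvRanks c (PySem.List.sorted E (fun e => e.1) false)).Perm (pvRanks c E) :=
  ((PySem.List.sorted_perm E (fun e => e.1) false).filter _).map _

theorem pv_kf_min (S : List (Int × String)) (hSp : S.Pairwise (fun a b => a.1 ≤ b.1))
    (r : Int) (c : String) (h : (r, c) ∈ pvKF PySem.Set.empty S) : pvIsMin c r S := by
  obtain ⟨-, h2, h3⟩ := pv_kf_mem PySem.Set.empty S hSp (r, c) h
  unfold pvIsMin
  constructor
  · exact List.mem_map.mpr ⟨(r, c), List.mem_filter.mpr ⟨h2, by simp⟩, rfl⟩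
  · intro x hx
    rcases List.mem_map.mp hx with ⟨e', he', heq'⟩
    have hf := List.mem_filter.mp he'
    have hr := h3 e' hf.1 (by simpa using hf.2)
    exact heq' ▸ hr

-- ---- tying B's dedup to A's dict items ----
theorem pv_dedup_perm (E : List (Int × String)) :
    (pvKF PySem.Set.empty (PySem.List.sorted E (fun e => e.1) false)).Perm
      (((E.foldl pvMinUpd PySem.Dict.empty).items).map (fun p => (p.2, p.1))) := by
  have hSp : (PySem.List.sorted E (fun e => e.1) false).Pairwise (fun a b => a.1 ≤ b.1) :=
    PySem.List.sorted_pairwise _ _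
  set S := PySem.List.sorted E (fun e => e.1) false with hSdef
  have hknd : (E.foldl pvMinUpd PySem.Dict.empty).keys.Nodup :=
    pv_minUpd_nodup E _ PySem.Dict.nodup_keys_empty
  have hn1 : (pvKF PySem.Set.empty S).Nodup := (pv_kf_nodup_snd _ _).of_map
  have hn2 : (((E.foldl pvMinUpd PySem.Dict.empty).items).map (fun p => (p.2, p.1))).Nodup := by
    have hni : (E.foldl pvMinUpd PySem.Dict.empty).items.Nodup := List.Nodup.of_map _ hknd
    refine hni.map ?_
    intro a b hab
    exact Prod.ext (congrArg Prod.snd hab) (congrArg Prod.fst hab)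
  refine (List.perm_ext_iff_of_nodup hn1 hn2).mpr ?_
  rintro ⟨r, c⟩
  have htrans : ∀ r', pvIsMin c r' S ↔ pvIsMin c r' E := by
    intro r'
    unfold pvIsMin
    constructor
    · rintro ⟨h1, h2⟩
      exact ⟨(pv_ranks_perm E c).mem_iff.mp h1, fun x hx => h2 x ((pv_ranks_perm E c).mem_iff.mpr hx)⟩
    · rintro ⟨h1, h2⟩
      exact ⟨(pv_ranks_perm E c).mem_iff.mpr h1, fun x hx => h2 x ((pv_ranks_perm E c).mem_iff.mp hx)⟩
  constructor
  · intro hmem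
    have hget : (E.foldl pvMinUpd PySem.Dict.empty).get? c = some r :=
      (pv_dict_char E c r).mpr ((htrans r).mp (pv_kf_min S hSp r c hmem))
    exact List.mem_map.mpr ⟨(c, r), PySem.Dict.mem_items_of_get?_eq_some _ hget, rfl⟩
  · intro hmem
    rcases List.mem_map.mp hmem with ⟨⟨c0, r0⟩, hp, heq⟩
    have hr0 : r0 = r := congrArg Prod.fst heq
    have hc0 : c0 = c := congrArg Prod.snd heq
    subst hr0; subst hc0
    have hget : (E.foldl pvMinUpd PySem.Dict.empty).get? c0 = some r0 :=
      PySem.Dict.get?_of_mem_items _ hp hknd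
    have hminE : pvIsMin c0 r0 E := (pv_dict_char E c0 r0).mp hget
    have hminS : pvIsMin c0 r0 S := (htrans r0).mpr hminE
    obtain ⟨h1, h2⟩ := hminS
    rcases List.mem_map.mp h1 with ⟨e, hef, heq2⟩
    have hc : c0 ∈ S.map (fun e => e.2) :=
      List.mem_map.mpr ⟨e, (List.mem_filter.mp hef).1, by simpa using (List.mem_filter.mp hef).2⟩
    obtain ⟨r', hr'⟩ := pv_kf_exists PySem.Set.empty S c0 (by simp [PySem.Set.empty]) hc
    have hminS' := pv_kf_min S hSp r' c0 hr'
    have hfin : r' = r0 := le_antisymm (hminS'.2 r0 h1) (h2 r' hminS'.1)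
    exact hfin ▸ hr'

theorem pv_B_side (E : List (Int × String)) :
    pvSweep (pvKF PySem.Set.empty (PySem.List.sorted E (fun e => e.1) false))
      = (pvC (E.foldl pvMinUpd PySem.Dict.empty).items).map (fun e => e.2) := by
  have hSp : (PySem.List.sorted E (fun e => e.1) false).Pairwise (fun a b => a.1 ≤ b.1) :=
    PySem.List.sorted_pairwise _ _
  set S := PySem.List.sorted E (fun e => e.1) false with hSdef
  set K := pvKF PySem.Set.empty S with hKdef
  set d := E.foldl pvMinUpd PySem.Dict.empty with hd
  have hKp : K.Pairwise (fun a b => a.1 ≤ b.1) := hSp.sublist (pv_kf_sublist _ _)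
  rw [pv_sweep_char K hKp]
  have hknd : d.keys.Nodup := pv_minUpd_nodup E _ PySem.Dict.nodup_keys_empty
  have hperm := pv_dedup_perm E
  have hcnt : ∀ z : Int, (K.map (fun x => x.1)).count z = (d.items.map (fun p => p.2)).count z := by
    intro z
    have h1 : (K.map (fun x => x.1)).Perm ((d.items.map (fun p => (p.2, p.1))).map (fun x => x.1)) :=
      hperm.map _
    have h2 : (d.items.map (fun p => (p.2, p.1))).map (fun x : Int × String => x.1)
        = d.items.map (fun p => p.2) := by
      simp [List.map_map, Function.comp_def]
    rw [h1.count_eq, h2]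
  have hq : K.filter (fun e => ((K.map (fun x => x.1)).count e.1 == 1))
      = K.filter (fun e => ((d.items.map (fun p => p.2)).count e.1 == 1)) := by
    apply List.filter_congr
    intro e _
    rw [hcnt e.1]
  rw [hq]
  have h3 : (d.items.map (fun p => (p.2, p.1))).filter
        (fun e => ((d.items.map (fun p => p.2)).count e.1 == 1))
      = (d.items.filter (fun p => ((d.items.map (fun pp => pp.2)).count p.2 == 1))).map
        (fun p => (p.2, p.1)) := by
    rw [List.filter_map]
    rfl
  have h4 : (K.filter (fun e => ((d.items.map (fun p => p.2)).count e.1 == 1))).Perm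
      ((d.items.filter (fun p => ((d.items.map (fun pp => pp.2)).count p.2 == 1))).map
        (fun p => (p.2, p.1))) := by
    refine (hperm.filter _).trans ?_
    rw [h3]
  have h5 : (pvC d.items).Perm
      (K.filter (fun e => ((d.items.map (fun p => p.2)).count e.1 == 1))) :=
    (pv_perm d.items hknd).trans h4.symm
  have h6 : PySem.List.sorted
      (K.filter (fun e => ((d.items.map (fun p => p.2)).count e.1 == 1))) (fun x => x.1) false
      = pvC d.items :=
    PySem.List.sorted_eq_of_perm_of_pairwise_lt _ _ _ h5 (pv_C_pairwise _)
  have h7 : PySem.List.sorted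
      (K.filter (fun e => ((d.items.map (fun p => p.2)).count e.1 == 1))) (fun x => x.1) false
      = K.filter (fun e => ((d.items.map (fun p => p.2)).count e.1 == 1)) :=
    PySem.List.sorted_eq_self_of_pairwise _ _ (hKp.sublist List.filter_sublist)
  rw [h7.symm.trans h6]

theorem pv_B_main (row : List (String × Int)) (cc : List String) :
    extract_top_choices_alt row cc
      = pvTail6 (pvC ((cc.filterMap (pvParse row)).foldl pvMinUpd PySem.Dict.empty).items) := by
  unfold extract_top_choices_alt
  simp only [pv_foldE, List.nil_append, pv_foldDedup]
  rw [pv_B_side]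
  set C := pvC ((cc.filterMap (pvParse row)).foldl pvMinUpd PySem.Dict.empty).items with hC
  have hs : PySem.List.sorted C (fun x : Int × String => x.1) false = C :=
    PySem.List.sorted_eq_self_of_pairwise _ _ ((pv_C_pairwise _).imp (fun h => le_of_lt h))
  unfold pvTail6
  rw [hs, ← List.map_take]
  simp [List.map_map, Function.comp_def]

-- ===== VERDICT (by name: the statement is the Claim_ definition above) =====
theorem extract_top_choices_spec : Claim_equal_extract_top_choices := by
  unfold Claim_equal_extract_top_choices
  intro row cc _ _
  unfold Spec_extract_top_choices
  rw [pv_A_main, pv_B_main]
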